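-- pv_equiv track=rewrite | github.com/Kimyongari/Solved_coding_problems | 프로그래머스/1/42862. 체육복/체육복.py | solution
-- ===== SOURCE A (Python) =====
-- def solution(n, lost, reserve):
--     new_lost = []
--     for i in lost:
--         if i in reserve:
--             reserve.remove(i)
--         else:
--             new_lost.append(i)
--     lost = new_lost
--     answer = n - len(lost)
--     lost.sort()
--     reserve.sort()
--     while lost:
--         a = lost.pop(0)
--         if a-1 in reserve:
--             reserve.remove(a-1)
--             answer += 1
--         elif a+1 in reserve:
--             reserve.remove(a+1)
--             answer += 1
--     return answer
-- ===== SOURCE B (Python) =====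
-- def solution(n, lost, reserve):
--     # Counter-based batch greedy: O(n log n); return-value equivalent to A
--     # (A mutates its `reserve` argument in place; B does not).
--     lc = {}
--     for x in lost:
--         lc[x] = lc.get(x, 0) + 1
--     rc = {}
--     for x in reserve:
--         rc[x] = rc.get(x, 0) + 1
--     rem = {}
--     for v in rc:
--         spare = rc[v] - lc.get(v, 0)
--         if spare > 0:
--             rem[v] = spare
--     answer = n
--     for v in sorted(lc):
--         need = lc[v] - rc.get(v, 0)
--         if need <= 0:
--             continue
--         t1 = min(need, rem.get(v - 1, 0))
--         if t1:
--             rem[v - 1] -= t1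
--         t2 = min(need - t1, rem.get(v + 1, 0))
--         if t2:
--             rem[v + 1] -= t2
--         answer -= need - t1 - t2
--     return answer
-- ===== Notes on version B (the rewrite author's own statement) =====
-- stated objective: faster
-- what changed: Replaces A's per-element list scans (in/remove/pop(0) over lists) by count dictionaries: pointwise multiset cancellation of lost vs reserve, then a batch greedy over the sorted distinct lost values using min-arithmetic on a spare-count dict.
import Mathlib
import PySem

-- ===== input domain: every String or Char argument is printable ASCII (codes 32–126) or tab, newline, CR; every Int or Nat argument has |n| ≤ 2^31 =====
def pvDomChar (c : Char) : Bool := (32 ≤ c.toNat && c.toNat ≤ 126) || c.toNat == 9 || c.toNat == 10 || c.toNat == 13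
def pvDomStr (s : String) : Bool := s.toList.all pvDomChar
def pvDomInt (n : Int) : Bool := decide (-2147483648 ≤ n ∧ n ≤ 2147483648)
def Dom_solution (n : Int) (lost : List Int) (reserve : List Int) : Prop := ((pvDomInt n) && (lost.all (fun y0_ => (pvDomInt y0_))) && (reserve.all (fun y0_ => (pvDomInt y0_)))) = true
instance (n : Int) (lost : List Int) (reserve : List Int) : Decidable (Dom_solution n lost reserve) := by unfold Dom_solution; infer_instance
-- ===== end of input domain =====

-- B replaces A's quadratic per-element list scans by count dictionaries and a batch
-- greedy over sorted distinct values (A mutates `reserve` in place, B does not;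
-- the equivalence proved here is about the return value).

-- ===== PORT A =====
-- first pass: cancel each lost student that also has a reserve
-- (`reserve.remove(i)` runs only under the `i in reserve` guard, where it removes the
--  first occurrence = List.erase, cf. PySem.List.remove?_eq_some_erase)
def solutionPhase1 (lost reserve : List Int) : List Int × List Int :=
  lost.foldl (fun st i =>
    if st.2.contains i then (st.1, st.2.erase i)
    else (st.1 ++ [i], st.2)) ([], reserve)

-- the `while lost:` loop, popping lost[0] each round
def solutionLoop : List Int → List Int → Int → Int
  | [], _, answer => answer
  | a :: rest, r, answer =>
    if r.contains (a - 1) then solutionLoop rest (r.erase (a - 1)) (answer + 1)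
    else if r.contains (a + 1) then solutionLoop rest (r.erase (a + 1)) (answer + 1)
    else solutionLoop rest r answer

def solution (n : Int) (lost : List Int) (reserve : List Int) : Int :=
  let p := solutionPhase1 lost reserve
  let lost2 := PySem.List.sorted p.1 (fun x => x) false
  let reserve2 := PySem.List.sorted p.2 (fun x => x) false
  solutionLoop lost2 reserve2 (n - p.1.length)

-- ===== PORT B =====
def solution_alt (n : Int) (lost : List Int) (reserve : List Int) : Int :=
  let lc := lost.foldl (fun d x => d.insert x (d.getD x 0 + 1)) PySem.Dict.empty
  let rc := reserve.foldl (fun d x => d.insert x (d.getD x 0 + 1)) PySem.Dict.empty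
  let rem := rc.keys.foldl (fun (rem : PySem.Dict Int Int) v =>
      let spare := rc.getD v 0 - lc.getD v 0
      if spare > 0 then rem.insert v spare else rem) PySem.Dict.empty
  let st := (PySem.List.sorted lc.keys (fun x => x) false).foldl
    (fun (st : Int × PySem.Dict Int Int) v =>
      let need := lc.getD v 0 - rc.getD v 0
      if need ≤ 0 then st
      else
        let t1 := min need (st.2.getD (v - 1) 0)
        let rem1 := if t1 ≠ 0 then st.2.insert (v - 1) (st.2.getD (v - 1) 0 - t1) else st.2
        let t2 := min (need - t1) (rem1.getD (v + 1) 0)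
        let rem2 := if t2 ≠ 0 then rem1.insert (v + 1) (rem1.getD (v + 1) 0 - t2) else rem1
        (st.1 - (need - t1 - t2), rem2))
    (n, rem)
  st.1

-- ===== PRECONDITION & SPEC =====
def Spec_solution (n : Int) (lost : List Int) (reserve : List Int) (out : Int) : Prop := out = solution_alt n lost reserve
instance (n : Int) (lost : List Int) (reserve : List Int) (out : Int) : Decidable (Spec_solution n lost reserve out) := by unfold Spec_solution; infer_instance

-- ===== CLAIM (what is proved, stated in full; the proofs are below) =====
def Claim_equal_solution : Prop := ∀ (n : Int) (lost : List Int) (reserve : List Int), Dom_solution n lost reserve → Spec_solution n lost reserve (solution n lost reserve)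

-- ===== LEMMAS AND PROOFS =====

-- count-level model of A's matching loop
def loopC : List Int → (Int → Nat) → Nat
  | [], _ => 0
  | a :: rest, f =>
    if 0 < f (a - 1) then 1 + loopC rest (Function.update f (a - 1) (f (a - 1) - 1))
    else if 0 < f (a + 1) then 1 + loopC rest (Function.update f (a + 1) (f (a + 1) - 1))
    else loopC rest f

theorem phase1_count (lost : List Int) : ∀ (nl r : List Int) (v : Int),
    ((lost.foldl (fun st i =>
      if st.2.contains i then (st.1, st.2.erase i)
      else (st.1 ++ [i], st.2)) (nl, r)).1.count v
       = nl.count v + (lost.count v - min (lost.count v) (r.count v)))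
  ∧ ((lost.foldl (fun st i =>
      if st.2.contains i then (st.1, st.2.erase i)
      else (st.1 ++ [i], st.2)) (nl, r)).2.count v
       = r.count v - min (lost.count v) (r.count v)) := by
  induction lost with
  | nil => intro nl r v; simp
  | cons i rest ih =>
    intro nl r v
    simp only [List.foldl_cons]
    by_cases hm : r.contains i
    · rw [if_pos hm]
      have hpos : 0 < r.count i := List.count_pos_iff.mpr (List.contains_iff_mem.mp hm)
      obtain ⟨h1, h2⟩ := ih nl (r.erase i) v
      rcases eq_or_ne v i with hv|hv
      · subst hv
        rw [List.count_erase_self] at h1 h2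
        rw [h1, h2, List.count_cons_self]
        constructor <;> omega
      · rw [List.count_erase_of_ne hv] at h1 h2
        have hc : List.count v (i :: rest) = List.count v rest := by
          simp [Ne.symm hv]
        rw [h1, h2, hc]
        constructor <;> omega
    · rw [if_neg hm]
      have hz : r.count i = 0 := List.count_eq_zero.mpr (fun h => hm (List.contains_iff_mem.mpr h))
      obtain ⟨h1, h2⟩ := ih (nl ++ [i]) r v
      rw [List.count_append] at h1
      rcases eq_or_ne v i with hv|hv
      · subst hv
        have hs : List.count v [v] = 1 := by simp
        rw [hs] at h1
        rw [h1, h2, List.count_cons_self]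
        constructor <;> omega
      · have hc : List.count v (i :: rest) = List.count v rest := by
          simp [Ne.symm hv]
        have hs : List.count v [i] = 0 := by simp [Ne.symm hv]
        rw [hs] at h1
        rw [h1, h2, hc]
        constructor <;> omega

theorem count_erase_fun (r : List Int) (a : Int) (ha : a ∈ r) :
    (fun v => (r.erase a).count v) = Function.update (fun v => r.count v) a (r.count a - 1) := by
  funext v
  rcases eq_or_ne v a with hv|hv
  · subst hv; simp [List.count_erase_self, Function.update]
  · simp [List.count_erase_of_ne hv, Function.update, hv]

theorem loopA_eq_loopC (l : List Int) : ∀ (r : List Int) (ans : Int),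
    solutionLoop l r ans = ans + loopC l (fun v => r.count v) := by
  induction l with
  | nil => intro r ans; simp [solutionLoop, loopC]
  | cons a rest ih =>
    intro r ans
    rw [solutionLoop, loopC]
    by_cases h1 : r.contains (a - 1)
    · have hm := List.contains_iff_mem.mp h1
      have hp : 0 < r.count (a - 1) := List.count_pos_iff.mpr hm
      rw [if_pos h1, if_pos hp, ih, count_erase_fun r (a-1) hm]
      push_cast; ring
    · have hz : r.count (a - 1) = 0 := by
        rcases Nat.eq_zero_or_pos (r.count (a-1)) with h|h
        · exact h
        · exact absurd (List.contains_iff_mem.mpr (List.count_pos_iff.mp h)) h1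
      have hn1 : ¬ 0 < List.count (a - 1) r := by omega
      rw [if_neg h1, if_neg hn1]
      by_cases h2 : r.contains (a + 1)
      · have hm := List.contains_iff_mem.mp h2
        have hp : 0 < r.count (a + 1) := List.count_pos_iff.mpr hm
        rw [if_pos h2, if_pos hp, ih, count_erase_fun r (a+1) hm]
        push_cast; ring
      · have hz2 : r.count (a + 1) = 0 := by
          rcases Nat.eq_zero_or_pos (r.count (a+1)) with h|h
          · exact h
          · exact absurd (List.contains_iff_mem.mpr (List.count_pos_iff.mp h)) h2
        have hn2 : ¬ 0 < List.count (a + 1) r := by omega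
        rw [if_neg h2, if_neg hn2, ih]

theorem loopC_batch (c : Nat) (v : Int) : ∀ (rest : List Int) (f : Int → Nat),
    loopC (List.replicate c v ++ rest) f =
      min c (f (v - 1)) + min (c - min c (f (v - 1))) (f (v + 1)) +
      loopC rest (Function.update (Function.update f (v - 1) (f (v - 1) - min c (f (v - 1))))
        (v + 1) (f (v + 1) - min (c - min c (f (v - 1))) (f (v + 1)))) := by
  have hne : v - 1 ≠ v + 1 := by omega
  induction c with
  | zero =>
    intro rest f
    simp [Function.update_eq_self]
  | succ c ih =>
    intro rest f
    rw [List.replicate_succ, List.cons_append, loopC]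
    by_cases h1 : 0 < f (v - 1)
    · rw [if_pos h1, ih]
      set g := Function.update f (v - 1) (f (v - 1) - 1) with hg
      have gv1 : g (v - 1) = f (v - 1) - 1 := by simp [hg]
      have gv2 : g (v + 1) = f (v + 1) := by simp [hg, hne.symm]
      rw [gv1, gv2]
      have efun : Function.update (Function.update g (v - 1) (f (v - 1) - 1 - min c (f (v - 1) - 1)))
          (v + 1) (f (v + 1) - min (c - min c (f (v - 1) - 1)) (f (v + 1))) =
          Function.update (Function.update f (v - 1) (f (v - 1) - min (c + 1) (f (v - 1))))
          (v + 1) (f (v + 1) - min ((c + 1) - min (c + 1) (f (v - 1))) (f (v + 1))) := by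
        rw [hg, Function.update_idem]
        have e3 : f (v - 1) - 1 - min c (f (v - 1) - 1) = f (v - 1) - min (c + 1) (f (v - 1)) := by omega
        have e4 : c - min c (f (v - 1) - 1) = c + 1 - min (c + 1) (f (v - 1)) := by omega
        rw [e3, e4]
      rw [efun]
      omega
    · have hz1 : f (v - 1) = 0 := by omega
      rw [if_neg h1]
      by_cases h2 : 0 < f (v + 1)
      · rw [if_pos h2, ih]
        set g := Function.update f (v + 1) (f (v + 1) - 1) with hg
        have gv1 : g (v - 1) = f (v - 1) := by simp [hg, hne]
        have gv2 : g (v + 1) = f (v + 1) - 1 := by simp [hg]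
        have efun : Function.update (Function.update g (v - 1) (g (v - 1) - min c (g (v - 1))))
            (v + 1) (g (v + 1) - min (c - min c (g (v - 1))) (g (v + 1))) =
            Function.update (Function.update f (v - 1) (f (v - 1) - min (c + 1) (f (v - 1))))
            (v + 1) (f (v + 1) - min ((c + 1) - min (c + 1) (f (v - 1))) (f (v + 1))) := by
          funext x
          rcases eq_or_ne x (v + 1) with hx|hx
          · subst hx; simp [Function.update, gv1, gv2, hz1]; omega
          · rcases eq_or_ne x (v - 1) with hy|hy
            · subst hy; simp [Function.update, hne, hz1, hg]
            · simp [Function.update, hx, hy, hg]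
        rw [efun, gv1, gv2, hz1]
        simp only [Nat.min_zero]
        omega
      · have hz2 : f (v + 1) = 0 := by omega
        rw [if_neg h2, ih]
        rw [hz1, hz2]
        simp

theorem count_flatMap_replicate (vs : List Int) (cnt : Int → Nat) (x : Int) (hnd : vs.Nodup) :
    (vs.flatMap fun v => List.replicate (cnt v) v).count x = if x ∈ vs then cnt x else 0 := by
  induction vs with
  | nil => simp
  | cons v vs ih =>
    simp only [List.flatMap_cons, List.count_append, List.count_replicate]
    rcases List.nodup_cons.mp hnd with ⟨hv, hnd'⟩
    rw [ih hnd']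
    rcases eq_or_ne x v with hx|hx
    · subst hx; simp [hv]
    · simp [hx, Ne.symm hx]

theorem blocks_perm (vs L : List Int) (hnd : vs.Nodup) (hsub : ∀ x ∈ L, x ∈ vs) :
    (vs.flatMap fun v => List.replicate (L.count v) v).Perm L := by
  rw [List.perm_iff_count]
  intro x
  rw [count_flatMap_replicate vs _ x hnd]
  by_cases hx : x ∈ vs
  · simp [hx]
  · have : L.count x = 0 := List.count_eq_zero.mpr (fun h => hx (hsub x h))
    simp [hx, this]

theorem blocks_pairwise (vs : List Int) (cnt : Int → Nat) (hp : vs.Pairwise (· < ·)) :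
    (vs.flatMap fun v => List.replicate (cnt v) v).Pairwise (fun a b => a ≤ b) := by
  induction vs with
  | nil => simp
  | cons v vs ih =>
    rcases List.pairwise_cons.mp hp with ⟨hv, hp'⟩
    simp only [List.flatMap_cons]
    rw [List.pairwise_append]
    refine ⟨List.pairwise_replicate.mpr (Or.inr le_rfl), ih hp', ?_⟩
    intro a ha b hb
    rcases List.eq_of_mem_replicate ha with rfl
    rcases List.mem_flatMap.mp hb with ⟨w, hw, hbw⟩
    rcases List.eq_of_mem_replicate hbw with rfl
    exact le_of_lt (hv _ hw)

theorem sorted_blocks (vs L : List Int) (hnd : vs.Nodup) (hp : vs.Pairwise (· < ·))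
    (hsub : ∀ x ∈ L, x ∈ vs) :
    PySem.List.sorted L (fun x => x) false = vs.flatMap fun v => List.replicate (L.count v) v :=
  PySem.List.sorted_id_eq_of_perm_of_pairwise _ _ (blocks_perm vs L hnd hsub)
    (blocks_pairwise vs _ hp)

theorem rem_fold_getD (g : Int → Int) (ks : List Int) : ∀ (d : PySem.Dict Int Int) (s : Int),
    (ks.foldl (fun rem v => if g v > 0 then rem.insert v (g v) else rem) d).getD s 0
      = if s ∈ ks ∧ g s > 0 then g s else d.getD s 0 := by
  induction ks with
  | nil => intro d s; simp
  | cons k ks ih =>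
    intro d s
    rw [List.foldl_cons, ih]
    by_cases hs : s ∈ ks ∧ g s > 0
    · simp [hs, List.mem_cons]
    · rw [if_neg hs]
      rcases eq_or_ne s k with rfl|hne
      · by_cases hg : g s > 0
        · rw [if_pos hg, PySem.Dict.getD_insert_self]
          simp [hg]
        · rw [if_neg hg, if_neg (by tauto)]
      · have hcond : ¬ (s ∈ k :: ks ∧ g s > 0) := by
          simp only [List.mem_cons]
          tauto
        rw [if_neg hcond]
        by_cases hg : g k > 0
        · rw [if_pos hg, PySem.Dict.getD_insert_of_ne _ _ _ hne]
        · rw [if_neg hg]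

def Bstep (needF : Int → Int) (st : Int × PySem.Dict Int Int) (v : Int) :
    Int × PySem.Dict Int Int :=
  let need := needF v
  if need ≤ 0 then st
  else
    let t1 := min need (st.2.getD (v - 1) 0)
    let rem1 := if t1 ≠ 0 then st.2.insert (v - 1) (st.2.getD (v - 1) 0 - t1) else st.2
    let t2 := min (need - t1) (rem1.getD (v + 1) 0)
    let rem2 := if t2 ≠ 0 then rem1.insert (v + 1) (rem1.getD (v + 1) 0 - t2) else rem1
    (st.1 - (need - t1 - t2), rem2)

theorem main_fold (needF : Int → Int) (vs : List Int) (cnt : Int → Nat)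
    (hneed : ∀ v ∈ vs, (cnt v : Int) = max (needF v) 0) :
    ∀ (f : Int → Nat) (rem : PySem.Dict Int Int) (ans : Int),
    (∀ s, rem.getD s 0 = (f s : Int)) →
    (vs.foldl (Bstep needF) (ans, rem)).1
      = ans - ((vs.map cnt).sum : Int)
        + loopC (vs.flatMap fun v => List.replicate (cnt v) v) f := by
  induction vs with
  | nil => intro f rem ans _; simp [loopC]
  | cons v vs ih =>
    intro f rem ans hrem
    have hv := hneed v (List.mem_cons_self ..)
    have hneed' : ∀ w ∈ vs, (cnt w : Int) = max (needF w) 0 :=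
      fun w hw => hneed w (List.mem_cons_of_mem _ hw)
    rw [List.foldl_cons]
    by_cases hle : needF v ≤ 0
    · have hstep : Bstep needF (ans, rem) v = (ans, rem) := by
        simp only [Bstep]; rw [if_pos hle]
      have hc0 : cnt v = 0 := by omega
      rw [hstep, ih hneed' f rem ans hrem]
      simp [hc0]
    · have hpos : 0 < needF v := by omega
      have hcv : (cnt v : Int) = needF v := by omega
      set c := cnt v with hc
      set t1n := min c (f (v - 1)) with ht1n
      have ht1nle : t1n ≤ c ∧ t1n ≤ f (v - 1) := by
        constructor <;> omega
      set f1 := Function.update f (v - 1) (f (v - 1) - t1n) with hf1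
      have hf1v : f1 (v + 1) = f (v + 1) := by
        rw [hf1, Function.update_of_ne (by omega)]
      set t2n := min (c - t1n) (f (v + 1)) with ht2n
      set f2 := Function.update f1 (v + 1) (f1 (v + 1) - t2n) with hf2
      set t1 := min (needF v) (rem.getD (v - 1) 0) with ht1
      have et1 : t1 = (t1n : Int) := by
        rw [ht1, hrem, ← hcv, ht1n]; push_cast; ring
      set rem1 := if t1 ≠ 0 then rem.insert (v - 1) (rem.getD (v - 1) 0 - t1) else rem with hrem1def
      have hrem1 : ∀ s, rem1.getD s 0 = (f1 s : Int) := by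
        intro s
        rw [hrem1def, et1]
        by_cases h0 : (t1n : Int) ≠ 0
        · rw [if_pos h0]
          rcases eq_or_ne s (v - 1) with rfl|hs
          · rw [PySem.Dict.getD_insert_self, hrem, hf1]
            simp only [Function.update_self]
            push_cast [ht1nle.2]; ring
          · rw [PySem.Dict.getD_insert_of_ne _ _ _ hs, hrem, hf1, Function.update_of_ne hs]
        · rw [if_neg h0]
          have h0' : t1n = 0 := by exact_mod_cast not_not.mp h0
          rw [hrem, hf1]
          rcases eq_or_ne s (v - 1) with rfl|hs
          · simp [h0']
          · rw [Function.update_of_ne hs]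
      set t2 := min (needF v - t1) (rem1.getD (v + 1) 0) with ht2
      have et2 : t2 = (t2n : Int) := by
        rw [ht2, hrem1, hf1v, et1, ← hcv, ht2n]
        push_cast [ht1nle.1]; ring
      set rem2 := if t2 ≠ 0 then rem1.insert (v + 1) (rem1.getD (v + 1) 0 - t2) else rem1 with hrem2def
      have hrem2 : ∀ s, rem2.getD s 0 = (f2 s : Int) := by
        intro s
        have ht2nle : t2n ≤ f1 (v + 1) := by rw [hf1v]; omega
        rw [hrem2def, et2]
        by_cases h0 : (t2n : Int) ≠ 0
        · rw [if_pos h0]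
          rcases eq_or_ne s (v + 1) with rfl|hs
          · rw [PySem.Dict.getD_insert_self, hrem1, hf2]
            simp only [Function.update_self]
            push_cast [ht2nle]; ring
          · rw [PySem.Dict.getD_insert_of_ne _ _ _ hs, hrem1, hf2, Function.update_of_ne hs]
        · rw [if_neg h0]
          have h0' : t2n = 0 := by exact_mod_cast not_not.mp h0
          rw [hrem1, hf2]
          rcases eq_or_ne s (v + 1) with rfl|hs
          · simp [h0']
          · rw [Function.update_of_ne hs]
      have hstep : Bstep needF (ans, rem) v = (ans - (needF v - t1 - t2), rem2) := by
        simp only [Bstep]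
        rw [if_neg hle]
      rw [hstep, ih hneed' f2 rem2 _ hrem2]
      have hbatch := loopC_batch c v (vs.flatMap fun w => List.replicate (cnt w) w) f
      rw [List.flatMap_cons, ← hc, hbatch, ← ht1n, ← ht2n]
      have hfun : Function.update (Function.update f (v - 1) (f (v - 1) - t1n)) (v + 1)
          (f (v + 1) - t2n) = f2 := by
        rw [hf2, hf1v, hf1]
      rw [hfun]
      simp only [List.map_cons, List.sum_cons]
      push_cast
      omega


def cntLF (lost reserve : List Int) (v : Int) : Nat :=
  lost.count v - min (lost.count v) (reserve.count v)

def f0F (lost reserve : List Int) (v : Int) : Nat :=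
  reserve.count v - min (lost.count v) (reserve.count v)

theorem solution_spec' (n : Int) (lost : List Int) (reserve : List Int) :
    solution n lost reserve = solution_alt n lost reserve := by
  set lc := PySem.Dict.counter lost with hlc
  set rc := PySem.Dict.counter reserve with hrc
  set vs := PySem.List.sorted lc.keys (fun x => x) false with hvs
  -- phase 1 of A, at the count level
  have hL : ∀ v, (solutionPhase1 lost reserve).1.count v = cntLF lost reserve v := by
    intro v
    have := (phase1_count lost [] reserve v).1
    simpa [solutionPhase1, cntLF] using this
  have hR : ∀ v, (solutionPhase1 lost reserve).2.count v = f0F lost reserve v := by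
    intro v
    have := (phase1_count lost [] reserve v).2
    simpa [solutionPhase1, f0F] using this
  have hgetL : ∀ v, lc.getD v 0 = (lost.count v : Int) := fun v => by
    rw [hlc, PySem.Dict.getD_counter]
  have hgetR : ∀ v, rc.getD v 0 = (reserve.count v : Int) := fun v => by
    rw [hrc, PySem.Dict.getD_counter]
  -- the sorted key list of the lost counter: distinct lost values in increasing order
  have hvsmem : ∀ x, x ∈ vs ↔ x ∈ lost := by
    intro x
    rw [hvs, PySem.List.mem_sorted, hlc, PySem.Dict.keys_counter, PySem.Set.mem_ofList]
  have hvsnd : vs.Nodup := by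
    rw [hvs]
    exact ((PySem.List.sorted_perm _ _ _).nodup_iff).mpr (PySem.Dict.nodup_keys_counter lost)
  have hvslt : vs.Pairwise (· < ·) := by
    rw [hvs, hlc, PySem.Dict.keys_counter]
    exact PySem.List.sorted_ofList_pairwise_lt lost
  have hsub : ∀ x ∈ (solutionPhase1 lost reserve).1, x ∈ vs := by
    intro x hx
    have hp : 0 < (solutionPhase1 lost reserve).1.count x := List.count_pos_iff.mpr hx
    rw [hL x] at hp
    simp only [cntLF] at hp
    have : 0 < lost.count x := by omega
    exact (hvsmem x).mpr (List.count_pos_iff.mp this)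
  -- A's value
  have hsortedL : PySem.List.sorted (solutionPhase1 lost reserve).1 (fun x => x) false
      = vs.flatMap fun v => List.replicate (cntLF lost reserve v) v := by
    have h := sorted_blocks vs (solutionPhase1 lost reserve).1 hvsnd hvslt hsub
    rw [h]
    congr 1
    funext v
    rw [hL v]
  have hcountR : (fun v => (PySem.List.sorted (solutionPhase1 lost reserve).2
      (fun x => x) false).count v) = f0F lost reserve := by
    funext v
    rw [(PySem.List.sorted_perm (solutionPhase1 lost reserve).2 (fun x => x) false).count_eq, hR v]
  have hA : solution n lost reserve
      = n - ((solutionPhase1 lost reserve).1.length : Int)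
        + loopC (vs.flatMap fun v => List.replicate (cntLF lost reserve v) v)
            (f0F lost reserve) := by
    show solutionLoop _ _ _ = _
    rw [loopA_eq_loopC, hcountR, hsortedL]
  -- B's value
  have hneed : ∀ v ∈ vs, ((cntLF lost reserve v : Int)) = max (lc.getD v 0 - rc.getD v 0) 0 := by
    intro v _
    rw [hgetL, hgetR]
    simp only [cntLF]
    omega
  have hremD : ∀ s,
      (rc.keys.foldl (fun (rem : PySem.Dict Int Int) v =>
        if rc.getD v 0 - lc.getD v 0 > 0 then rem.insert v (rc.getD v 0 - lc.getD v 0) else rem)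
        PySem.Dict.empty).getD s 0 = (f0F lost reserve s : Int) := by
    intro s
    rw [rem_fold_getD (fun v => rc.getD v 0 - lc.getD v 0) rc.keys PySem.Dict.empty s]
    have hks : s ∈ rc.keys ↔ s ∈ reserve := by
      rw [hrc, PySem.Dict.keys_counter, PySem.Set.mem_ofList]
    by_cases hs : s ∈ rc.keys ∧ rc.getD s 0 - lc.getD s 0 > 0
    · rw [if_pos hs]
      have h2 := hs.2
      rw [hgetR, hgetL] at h2 ⊢
      simp only [f0F]
      omega
    · rw [if_neg hs]
      rcases Decidable.not_and_iff_not_or_not.mp hs with h|h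
      · have hnm : s ∉ reserve := fun hm => h (hks.mpr hm)
        have hz : reserve.count s = 0 := List.count_eq_zero.mpr hnm
        simp [f0F, hz]
      · rw [hgetR, hgetL] at h
        have hz : (f0F lost reserve s : Int) = 0 := by
          simp only [f0F]; omega
        simp [hz]
  have hB : solution_alt n lost reserve
      = n - ((vs.map (cntLF lost reserve)).sum : Int)
        + loopC (vs.flatMap fun v => List.replicate (cntLF lost reserve v) v)
            (f0F lost reserve) := by
    have hfold := main_fold (fun v => lc.getD v 0 - rc.getD v 0) vs (cntLF lost reserve) hneed
      (f0F lost reserve) _ n hremD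
    calc solution_alt n lost reserve
        = (vs.foldl (Bstep (fun v => lc.getD v 0 - rc.getD v 0))
            (n, rc.keys.foldl (fun (rem : PySem.Dict Int Int) v =>
              if rc.getD v 0 - lc.getD v 0 > 0 then rem.insert v (rc.getD v 0 - lc.getD v 0)
              else rem) PySem.Dict.empty)).1 := by
          show solution_alt n lost reserve = _
          simp only [solution_alt, PySem.Dict.foldl_insert_getD_add_one_eq_counter]
          rfl
      _ = _ := hfold
  -- the two totals agree
  have hlen : ((solutionPhase1 lost reserve).1.length : Int)
      = ((vs.map (cntLF lost reserve)).sum : Int) := by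
    have hperm := blocks_perm vs (solutionPhase1 lost reserve).1 hvsnd hsub
    have h1 : (vs.flatMap fun v =>
        List.replicate ((solutionPhase1 lost reserve).1.count v) v).length
        = (solutionPhase1 lost reserve).1.length := hperm.length_eq
    rw [List.length_flatMap] at h1
    have h2 : (vs.map fun v =>
        (List.replicate ((solutionPhase1 lost reserve).1.count v) v).length)
        = vs.map (cntLF lost reserve) := by
      congr 1
      funext v
      rw [List.length_replicate, hL v]
    rw [h2] at h1
    rw [← h1]
  rw [hA, hB, hlen]

-- ===== VERDICT (by name: the statement is the Claim_ definition above) =====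
theorem solution_spec : Claim_equal_solution := by
  intro n lost reserve _
  exact solution_spec' n lost reserve
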